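-- pv_equiv track=rewrite | github.com/graphsignal/solver-demo | solutions/1016-C.py | max_mushrooms
-- ===== SOURCE A (Python) =====
-- def max_mushrooms(n, a, b):
--     # Calculate prefix sums for both rows
--     prefix_a = [0] * (n + 1)
--     prefix_b = [0] * (n + 1)
--
--     for i in range(1, n+1):
--         prefix_a[i] = prefix_a[i-1] + a[i-1]
--         prefix_b[i] = prefix_b[i-1] + b[i-1]
--
--     # Initialize two possible maximum scores for reaching the end
--     max_weight_end1 = 0
--     max_weight_end2 = 0
--
--     # Try all possible split points where Vasya changes from first row to second row
--     for i in range(1, n+1):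
--         # Collect all from (1,1) to (1,i) then (2,i) to (2,n)
--         collect_path1 = prefix_a[i] + (prefix_b[n] - prefix_b[i-1])
--         # Collect all from (1,1) to (1,n) to (2,n) to (2,i)
--         collect_path2 = prefix_b[i] + (prefix_a[n] - prefix_a[i-1])
--
--         # Track the maximum weight possible ending at row 1 or row 2
--         max_weight_end1 = max(max_weight_end1, collect_path1)
--         max_weight_end2 = max(max_weight_end2, collect_path2)
--
--     # The answer will be the maximum possible mushrooms collected across any valid path
--     return max(max_weight_end1, max_weight_end2)
-- ===== SOURCE B (Python) =====
-- def max_mushrooms(n, a, b):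
--     # Backward dynamic-programming sweep: walk i = n-1 .. 0 keeping suffix sums
--     # and the DP recurrences
--     #   best1(i) = a[i] + max(suffix_b(i), best1(i+1))   (switch row 1 -> 2 at or after i)
--     #   best2(i) = b[i] + max(suffix_a(i), best2(i+1))
--     # No prefix tables, no totals, no per-split formula evaluation.
--     best1 = None
--     best2 = None
--     sa = 0
--     sb = 0
--     for i in range(n - 1, -1, -1):
--         sa += a[i]
--         sb += b[i]
--         best1 = a[i] + (sb if best1 is None else max(sb, best1))
--         best2 = b[i] + (sa if best2 is None else max(sa, best2))
--     if best1 is None: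
--         return 0
--     return max(0, best1, best2)
-- ===== Notes on version B (the rewrite author's own statement) =====
-- stated objective: alternative
-- what changed: Replaces A's prefix-table build plus per-split formula scan by a single backward dynamic-programming sweep: a max-recurrence best(i) = row[i] + max(other-row suffix sum, best(i+1)) over suffix sums, with no prefix arrays, no totals and no explicit split formula.
import Mathlib
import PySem

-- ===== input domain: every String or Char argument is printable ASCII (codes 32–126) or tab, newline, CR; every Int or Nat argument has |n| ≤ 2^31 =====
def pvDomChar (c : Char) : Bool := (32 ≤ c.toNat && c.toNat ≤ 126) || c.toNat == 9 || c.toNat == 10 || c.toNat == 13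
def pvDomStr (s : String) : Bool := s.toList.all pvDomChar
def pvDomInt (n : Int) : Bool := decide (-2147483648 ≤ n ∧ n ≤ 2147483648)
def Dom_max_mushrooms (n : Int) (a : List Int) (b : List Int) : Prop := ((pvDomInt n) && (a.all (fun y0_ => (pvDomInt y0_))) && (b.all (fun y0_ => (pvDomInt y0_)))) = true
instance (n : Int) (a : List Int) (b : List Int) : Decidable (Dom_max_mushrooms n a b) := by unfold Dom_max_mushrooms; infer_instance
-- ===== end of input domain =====

-- B replaces A's prefix-table build + per-split scan by one backward DP sweep (max-recurrence over suffix sums, O(1) extra space).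


-- ===== PORT A =====
-- literal port of A: build prefix_a/prefix_b tables ([0]*(n+1), then prefix[i] = prefix[i-1]+row[i-1]),
-- then scan split points i = 1..n tracking two maxima; index reads/writes use pyGetD/pySetD (exact in range; Pre_ excludes IndexError)
def max_mushrooms (n : Int) (a : List Int) (b : List Int) : Int :=
  let prefix0 : List Int := PySem.List.pyRepeat [0] (n + 1)
  let pr :=
    (PySem.List.pyRange 1 (n + 1) 1).foldl
      (fun (st : List Int × List Int) i =>
        (PySem.List.pySetD st.1 i (PySem.List.pyGetD st.1 (i - 1) 0 + PySem.List.pyGetD a (i - 1) 0),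
         PySem.List.pySetD st.2 i (PySem.List.pyGetD st.2 (i - 1) 0 + PySem.List.pyGetD b (i - 1) 0)))
      (prefix0, prefix0)
  let m :=
    (PySem.List.pyRange 1 (n + 1) 1).foldl
      (fun (st : Int × Int) i =>
        (max st.1 (PySem.List.pyGetD pr.1 i 0 + (PySem.List.pyGetD pr.2 n 0 - PySem.List.pyGetD pr.2 (i - 1) 0)),
         max st.2 (PySem.List.pyGetD pr.2 i 0 + (PySem.List.pyGetD pr.1 n 0 - PySem.List.pyGetD pr.1 (i - 1) 0))))
      (0, 0)
  max m.1 m.2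

-- ===== PORT B =====
-- literal port of Source B: backward DP sweep i = n-1 .. 0 with state (best1 : Option, best2 : Option, sa, sb);
-- 'None' becomes 'none', 'x if best is None else max(x, best)' becomes the match
def max_mushrooms_alt (n : Int) (a : List Int) (b : List Int) : Int :=
  let st :=
    (PySem.List.pyRange (n - 1) (-1) (-1)).foldl
      (fun (st : Option Int × Option Int × Int × Int) i =>
        let sa := st.2.2.1 + PySem.List.pyGetD a i 0
        let sb := st.2.2.2 + PySem.List.pyGetD b i 0
        let b1 := PySem.List.pyGetD a i 0 + (match st.1 with | none => sb | some v => max sb v)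
        let b2 := PySem.List.pyGetD b i 0 + (match st.2.1 with | none => sa | some v => max sa v)
        (some b1, some b2, sa, sb))
      (none, none, 0, 0)
  match st.1, st.2.1 with
  | some v1, some v2 => max (max 0 v1) v2
  | _, _ => 0

-- ===== PRECONDITION & SPEC =====
-- A raises IndexError reading a[i-1]/b[i-1] when n exceeds a row's length; Pre_ excludes exactly those inputs.
def Pre_max_mushrooms (n : Int) (a : List Int) (b : List Int) : Prop :=
  n ≤ (a.length : Int) ∧ n ≤ (b.length : Int)
instance (n : Int) (a : List Int) (b : List Int) : Decidable (Pre_max_mushrooms n a b) := by unfold Pre_max_mushrooms; infer_instance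

def pvWitness_max_mushrooms : Int × List Int × List Int := (3, [1, 2, 3], [4, 5, 6])

def Spec_max_mushrooms (n : Int) (a : List Int) (b : List Int) (out : Int) : Prop := out = max_mushrooms_alt n a b
instance (n : Int) (a : List Int) (b : List Int) (out : Int) : Decidable (Spec_max_mushrooms n a b out) := by unfold Spec_max_mushrooms; infer_instance

-- ===== CLAIM (what is proved, stated in full; the proofs are below) =====
def Claim_equal_max_mushrooms : Prop := ∀ (n : Int) (a : List Int) (b : List Int), Dom_max_mushrooms n a b → Pre_max_mushrooms n a b → Spec_max_mushrooms n a b (max_mushrooms n a b)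

-- ===== LEMMAS AND PROOFS =====

-- prefix sum of the first k elements
def pvPS (xs : List Int) (k : Nat) : Int := (xs.take k).sum

lemma pvPS_succ (xs : List Int) (k : Nat) (hk : k < xs.length) :
    pvPS xs (k + 1) = pvPS xs k + xs.getD k 0 := by
  rw [pvPS, pvPS, List.take_add_one, List.sum_append, List.getD_eq_getElem?_getD,
    List.getElem?_eq_getElem hk]
  simp

-- the prefix table A has built after processing i = 1..k
def pvTab (xs : List Int) (n k : Nat) : List Int :=
  (List.range (k + 1)).map (pvPS xs) ++ List.replicate (n - k) 0

lemma pvTab_get (xs : List Int) (n k : Nat) (j : Nat) (hj : j ≤ k) :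
    PySem.List.pyGetD (pvTab xs n k) (j : Int) 0 = pvPS xs j := by
  rw [PySem.List.pyGetD_natCast]
  have hl : j < ((List.range (k + 1)).map (pvPS xs)).length := by simpa using by omega
  rw [pvTab, List.getD_eq_getElem?_getD, List.getElem?_append_left hl]
  simp [List.getElem?_map, List.getElem?_range (by omega : j < k + 1)]

lemma pvTab_set (xs : List Int) (n k : Nat) (hk : k < n) :
    PySem.List.pySetD (pvTab xs n k) ((k : Int) + 1) (pvPS xs (k + 1)) = pvTab xs n (k + 1) := by
  have h1 : ((k : Int) + 1) = ((k + 1 : Nat) : Int) := by push_cast; ring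
  rw [h1, PySem.List.pySetD_natCast, pvTab, pvTab]
  have hrep : List.replicate (n - k) (0 : Int) = 0 :: List.replicate (n - (k + 1)) 0 := by
    rw [← List.replicate_succ]; congr 1; omega
  rw [hrep, List.set_append]
  simp [List.range_succ]

-- A's build loop produces the prefix table (stated for one row; used for both)
lemma pvBuild (xs : List Int) (n k : Nat) (hk : k ≤ n) (hn : n ≤ xs.length) :
    (PySem.List.pyRange 1 ((k : Int) + 1) 1).foldl
      (fun (st : List Int) i =>
        PySem.List.pySetD st i (PySem.List.pyGetD st (i - 1) 0 + PySem.List.pyGetD xs (i - 1) 0))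
      (List.replicate (n + 1) 0)
      = pvTab xs n k := by
  induction k with
  | zero =>
    rw [PySem.List.pyRange_one_eq_nil (by norm_num)]
    simp [pvTab, pvPS, List.replicate_succ]
  | succ k ih =>
    have hk' : k ≤ n := by omega
    have hcast : ((k + 1 : Nat) : Int) + 1 = ((k : Int) + 1) + 1 := by push_cast; ring
    rw [hcast, PySem.List.pyRange_one_succ_right (by omega), List.foldl_append, ih hk']
    simp only [List.foldl_cons, List.foldl_nil, add_sub_cancel_right]
    rw [pvTab_get xs n k k le_rfl, PySem.List.pyGetD_natCast,
      ← pvPS_succ xs k (by omega), pvTab_set xs n k (by omega)]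

-- the split-point candidates A evaluates (1-based split i corresponds to j = i-1 here)
def pvC1 (a b : List Int) (N : Nat) (j : Nat) : Int := pvPS a (j + 1) + (pvPS b N - pvPS b j)
def pvC2 (a b : List Int) (N : Nat) (j : Nat) : Int := pvPS b (j + 1) + (pvPS a N - pvPS a j)

-- max of c over the inclusive index range [i, i+len]
def pvMx (c : Nat → Int) (i : Nat) : Nat → Int
  | 0 => c i
  | len + 1 => max (c i) (pvMx c (i + 1) len)

-- A's scan loop computes the running foldl-max of the candidates
lemma pvScanA (a b : List Int) (N : Nat) (k : Nat) (hk : k ≤ N) :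
    (PySem.List.pyRange 1 ((k : Int) + 1) 1).foldl
      (fun (st : Int × Int) i =>
        (max st.1 (PySem.List.pyGetD (pvTab a N N) i 0 +
          (PySem.List.pyGetD (pvTab b N N) (N : Int) 0 - PySem.List.pyGetD (pvTab b N N) (i - 1) 0)),
         max st.2 (PySem.List.pyGetD (pvTab b N N) i 0 +
          (PySem.List.pyGetD (pvTab a N N) (N : Int) 0 - PySem.List.pyGetD (pvTab a N N) (i - 1) 0))))
      (0, 0)
      = (((List.range k).map (pvC1 a b N)).foldl max 0,
         ((List.range k).map (pvC2 a b N)).foldl max 0) := by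
  induction k with
  | zero => simp [PySem.List.pyRange_one_eq_nil]
  | succ k ih =>
    rw [(by push_cast; ring : ((k + 1 : Nat) : Int) + 1 = ((k : Int) + 1) + 1),
      PySem.List.pyRange_one_succ_right (by omega), List.foldl_append, ih (by omega)]
    simp only [List.foldl_cons, List.foldl_nil, add_sub_cancel_right, List.range_succ,
      List.map_append, List.map_cons, List.map_nil]
    have h1 : ((k : Int) + 1) = ((k + 1 : Nat) : Int) := by push_cast; ring
    rw [h1, pvTab_get a N N (k + 1) (by omega), pvTab_get b N N (k + 1) (by omega),
      pvTab_get a N N k (by omega), pvTab_get b N N k (by omega),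
      pvTab_get a N N N le_rfl, pvTab_get b N N N le_rfl]
    simp [pvC1, pvC2]

-- folding max from a seed equals the seed maxed with the range max
lemma pvFoldMx (c : Nat → Int) (len : Nat) :
    ∀ (i : Nat) (s : Int),
      ((List.range' i (len + 1)).map c).foldl max s = max s (pvMx c i len) := by
  induction len with
  | zero => intro i s; simp [pvMx, List.range'_succ]
  | succ len ih =>
    intro i s
    rw [List.range'_succ, List.map_cons, List.foldl_cons, ih (i + 1) (max s (c i)), pvMx,
      max_assoc]

-- B's backward sweep invariant: after the loop has consumed indices N-1 .. i, the state is
-- (best over splits ≥ i minus the a-prefix, same for row 2, suffix sums); stated as the remaining fold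
def pvInv (a b : List Int) (N i : Nat) : Option Int × Option Int × Int × Int :=
  if i = N then (none, none, 0, 0)
  else (some (pvMx (pvC1 a b N) i (N - 1 - i) - pvPS a i),
        some (pvMx (pvC2 a b N) i (N - 1 - i) - pvPS b i),
        pvPS a N - pvPS a i, pvPS b N - pvPS b i)

def pvBody (a b : List Int) : (Option Int × Option Int × Int × Int) → Int → (Option Int × Option Int × Int × Int) :=
  fun st i =>
    let sa := st.2.2.1 + PySem.List.pyGetD a i 0
    let sb := st.2.2.2 + PySem.List.pyGetD b i 0
    let b1 := PySem.List.pyGetD a i 0 + (match st.1 with | none => sb | some v => max sb v)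
    let b2 := PySem.List.pyGetD b i 0 + (match st.2.1 with | none => sa | some v => max sa v)
    (some b1, some b2, sa, sb)

lemma pvStepB (a b : List Int) (N : Nat) (ha : N ≤ a.length) (hb : N ≤ b.length)
    (i : Nat) (hi : i < N) :
    pvBody a b (pvInv a b N (i + 1)) ((i : Int)) = pvInv a b N i := by
  have hga : PySem.List.pyGetD a (i : Int) 0 = a.getD i 0 := PySem.List.pyGetD_natCast _ _ _
  have hgb : PySem.List.pyGetD b (i : Int) 0 = b.getD i 0 := PySem.List.pyGetD_natCast _ _ _
  have hsa := pvPS_succ a i (by omega)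
  have hsb := pvPS_succ b i (by omega)
  by_cases h : i + 1 = N
  · subst h
    have hN1 : i + 1 - 1 - i = 0 := by omega
    simp only [pvInv, pvBody, ite_true, if_neg (by omega : ¬ i = i + 1), hN1, pvMx,
      Prod.mk.injEq, Option.some.injEq, pvC1, pvC2, hga, hgb, hsa, hsb, zero_add]
    refine ⟨by omega, by omega, by omega, by omega⟩
  · have hlen : N - 1 - i = (N - 1 - (i + 1)) + 1 := by omega
    simp only [pvInv, pvBody, if_neg h, if_neg (by omega : ¬ i = N), hlen, pvMx,
      Prod.mk.injEq, Option.some.injEq, pvC1, pvC2, hga, hgb, hsa, hsb]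
    refine ⟨?_, ?_, ?_, ?_⟩ <;> first
      | omega
      | (simp only [Int.max_def]; split_ifs <;> linarith)

-- the whole backward loop, by induction on the start index
lemma pvScanB (a b : List Int) (N : Nat) (ha : N ≤ a.length) (hb : N ≤ b.length) :
    ∀ i : Nat, i ≤ N →
    (PySem.List.pyRange ((i : Int) - 1) (-1) (-1)).foldl (pvBody a b) (pvInv a b N i)
      = pvInv a b N 0 := by
  intro i
  induction i with
  | zero => intro _; rw [PySem.List.pyRange_neg_one_eq_nil (by omega)]; rfl
  | succ i ih =>
    intro hi
    rw [(by push_cast; ring : ((i + 1 : Nat) : Int) - 1 = (i : Int)),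
      PySem.List.pyRange_neg_one_cons (by omega), List.foldl_cons,
      pvStepB a b N ha hb i (by omega),
      (by push_cast; ring : ((i : Nat) : Int) = ((i : Nat) : Int) - 1 + 1)]
    exact (by rw [(by ring : (i : Int) - 1 + 1 - 1 = (i : Int) - 1)]; exact ih (by omega))

theorem max_mushrooms_spec : Claim_equal_max_mushrooms := by
  intro n a b _ hpre
  unfold Spec_max_mushrooms max_mushrooms max_mushrooms_alt
  dsimp only
  by_cases hn : 0 < n
  · obtain ⟨N, rfl⟩ : ∃ N : Nat, n = (N : Int) := ⟨n.toNat, (Int.toNat_of_nonneg (by omega)).symm⟩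
    have hN : 0 < N := by exact_mod_cast hn
    obtain ⟨ha, hb⟩ := hpre
    have ha' : N ≤ a.length := by exact_mod_cast ha
    have hb' : N ≤ b.length := by exact_mod_cast hb
    have htn : (((N : Int) + 1)).toNat = N + 1 := by omega
    rw [PySem.List.pyRepeat_singleton, htn]
    rw [PySem.List.foldl_prod_mk
        (f := fun (st : List Int) i =>
          PySem.List.pySetD st i (PySem.List.pyGetD st (i - 1) 0 + PySem.List.pyGetD a (i - 1) 0))
        (g := fun (st : List Int) i =>
          PySem.List.pySetD st i (PySem.List.pyGetD st (i - 1) 0 + PySem.List.pyGetD b (i - 1) 0))]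
    rw [pvBuild a N N le_rfl ha', pvBuild b N N le_rfl hb']
    rw [pvScanA a b N N le_rfl]
    -- B side
    have hB := pvScanB a b N ha' hb' N le_rfl
    rw [pvInv, if_pos rfl] at hB
    rw [show (fun (st : Option Int × Option Int × Int × Int) (i : Int) =>
          let sa := st.2.2.1 + PySem.List.pyGetD a i 0
          let sb := st.2.2.2 + PySem.List.pyGetD b i 0
          let b1 := PySem.List.pyGetD a i 0 + (match st.1 with | none => sb | some v => max sb v)
          let b2 := PySem.List.pyGetD b i 0 + (match st.2.1 with | none => sa | some v => max sa v)
          ((some b1 : Option Int), (some b2 : Option Int), sa, sb)) = pvBody a b from rfl]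
    rw [hB, pvInv, if_neg (by omega : ¬ 0 = N)]
    -- both sides are now arithmetic in pvMx values
    have hfold1 : ((List.range N).map (pvC1 a b N)).foldl max 0
        = max 0 (pvMx (pvC1 a b N) 0 (N - 1)) := by
      rw [show List.range N = List.range' 0 ((N - 1) + 1) from by rw [List.range_eq_range']; congr 1; omega]
      exact pvFoldMx (pvC1 a b N) (N - 1) 0 0
    have hfold2 : ((List.range N).map (pvC2 a b N)).foldl max 0
        = max 0 (pvMx (pvC2 a b N) 0 (N - 1)) := by
      rw [show List.range N = List.range' 0 ((N - 1) + 1) from by rw [List.range_eq_range']; congr 1; omega]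
      exact pvFoldMx (pvC2 a b N) (N - 1) 0 0
    simp only [hfold1, hfold2, pvPS, List.take_zero, List.sum_nil, sub_zero, Nat.sub_zero]
    simp only [Int.max_def]
    split_ifs <;> linarith
  · rw [PySem.List.pyRange_one_eq_nil (by omega : n + 1 ≤ 1),
      PySem.List.pyRange_neg_one_eq_nil (by omega : n - 1 ≤ -1)]
    simp
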